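-- pv_equiv track=rewrite | github.com/Kim-TaeUk/wooki-AlgorithmPS | BaekJoon/Implementation/1316.py | check
-- ===== SOURCE A (Python) =====
-- def check(word):
--     tmp = word[0]
--     check_list = [tmp]
--     for x in word:
--         if x == tmp:
--             continue
--         elif x != tmp:
--             if x in check_list:
--                 return 0
--             else:
--                 tmp = x
--                 check_list.append(tmp)
--     return 1
-- ===== SOURCE B (Python) =====
-- def check(word):
--     for i in range(len(word) - 1):
--         if word[i] != word[i + 1] and word[i] in word[i + 1:]:
--             return 0
--     return 1
-- ===== Notes on version B (the rewrite author's own statement) =====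
-- stated objective: alternative
-- what changed: B is a stateless pattern search: it scans adjacent positions and returns 0 exactly when a run ends (word[i] != word[i+1]) and that letter reappears in the remaining suffix word[i+1:], instead of A's incremental scan with a current-letter variable and a growing seen-list.
import Mathlib
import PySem

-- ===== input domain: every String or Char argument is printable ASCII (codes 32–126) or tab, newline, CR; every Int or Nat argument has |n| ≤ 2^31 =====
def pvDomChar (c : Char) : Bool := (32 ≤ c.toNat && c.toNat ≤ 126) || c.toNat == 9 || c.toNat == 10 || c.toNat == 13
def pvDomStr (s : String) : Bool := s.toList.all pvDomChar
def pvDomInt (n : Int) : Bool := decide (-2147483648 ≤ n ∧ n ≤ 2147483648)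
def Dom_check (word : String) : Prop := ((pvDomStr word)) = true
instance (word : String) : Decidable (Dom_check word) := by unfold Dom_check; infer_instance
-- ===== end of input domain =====

-- B is a stateless pattern search over adjacent positions (fail iff a run ends and its letter
-- reappears in the remaining suffix), replacing A's incremental scan with a current-letter
-- variable and a growing seen-list (objective: alternative).

-- ===== PORT A =====
-- the for-loop of A: state = current letter tmp and the seen-list check_list; early 'return 0' ends the recursion
def checkLoop (xs : List Char) (tmp : Char) (checkList : List Char) : Int :=
  match xs with
  | [] => 1
  | x :: rest =>
    if x = tmp then checkLoop rest tmp checkList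
    else if checkList.contains x then 0
    else checkLoop rest x (checkList ++ [x])

def check (word : String) : Int :=
  match PySem.Str.pyGet? word 0 with   -- tmp = first character; none = IndexError on the empty string (excluded by Pre_check)
  | none => 0
  | some tmp => checkLoop word.toList tmp [tmp]

-- ===== PORT B =====
-- Source B's loop over i in range(len(word)-1): position i is the head of the remaining list,
-- position i+1 is the next element, and word[i+1:] is the tail (b :: r)
def altLoop (xs : List Char) : Int :=
  match xs with
  | a :: b :: r => if a ≠ b ∧ (b :: r).contains a then 0 else altLoop (b :: r)
  | _ => 1

def check_alt (word : String) : Int := altLoop word.toList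

-- ===== PRECONDITION & SPEC =====
-- Pre_ excludes only the empty string, on which A raises IndexError indexing word[0].
def Pre_check (word : String) : Prop := word ≠ ""
instance (word : String) : Decidable (Pre_check word) := by unfold Pre_check; infer_instance
def pvWitness_check : String := "aabba"

def Spec_check (word : String) (out : Int) : Prop := out = check_alt word
instance (word : String) (out : Int) : Decidable (Spec_check word out) := by unfold Spec_check; infer_instance

-- ===== CLAIM (what is proved, stated in full; the proofs are below) =====
def Claim_equal_check : Prop := ∀ (word : String), Dom_check word → Pre_check word → Spec_check word (check word)

-- ===== LEMMAS AND PROOFS =====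

-- the run keys of `tmp :: rest` after `tmp` (the keys of consecutive-duplicate groups)
def runKeys (tmp : Char) : List Char → List Char
  | [] => []
  | x :: r => if x = tmp then runKeys tmp r else x :: runKeys x r

theorem checkLoop_eq (rest : List Char) : ∀ (tmp : Char) (cl : List Char), cl.Nodup →
    checkLoop rest tmp cl = if (cl ++ runKeys tmp rest).Nodup then 1 else 0 := by
  induction rest with
  | nil => intro tmp cl h; simp [checkLoop, runKeys, h]
  | cons x r ih =>
    intro tmp cl h
    by_cases hx : x = tmp
    · simp [checkLoop, runKeys, hx, ih tmp cl h]
    · have hrk : runKeys tmp (x :: r) = x :: runKeys x r := by simp [runKeys, hx]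
      by_cases hc : x ∈ cl
      · have : ¬ (cl ++ runKeys tmp (x :: r)).Nodup := by
          intro hnd
          rw [hrk, List.nodup_append] at hnd
          exact hnd.2.2 x hc x List.mem_cons_self rfl
        simp [checkLoop, hx, hc, this]
      · have h' : (cl ++ [x]).Nodup := by
          rw [List.nodup_append]
          exact ⟨h, List.nodup_singleton x, fun a ha b hb hab => hc ((hab.trans (List.mem_singleton.mp hb)) ▸ ha)⟩
        have := ih x (cl ++ [x]) h'
        simp only [checkLoop, if_neg hx, List.contains_eq_mem, hc, decide_false,
          Bool.false_eq_true, if_false, this, hrk, List.append_assoc,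
          List.singleton_append]

-- membership in a list is membership among its head and run keys
theorem mem_runKeys (l : List Char) : ∀ (t x : Char), x ∈ t :: runKeys t l ↔ x ∈ t :: l := by
  induction l with
  | nil => intro t x; simp [runKeys]
  | cons y r ih =>
    intro t x
    by_cases hy : y = t
    · subst hy
      have := ih y x
      simp only [runKeys, List.mem_cons] at this ⊢
      tauto
    · have := ih y x
      simp only [runKeys, if_neg hy, List.mem_cons] at this ⊢
      tauto

theorem altLoop_eq (l : List Char) : ∀ (a : Char),
    altLoop (a :: l) = if (a :: runKeys a l).Nodup then 1 else 0 := by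
  induction l with
  | nil => intro a; simp [altLoop, runKeys]
  | cons b r ih =>
    intro a
    by_cases hb : b = a
    · subst hb
      simp only [altLoop, ne_eq, not_true_eq_false, false_and, if_false, runKeys]
      exact ih b
    · have hrk : runKeys a (b :: r) = b :: runKeys b r := by simp [runKeys, hb]
      by_cases hm : a ∈ b :: r
      · have hmk : a ∈ b :: runKeys b r := by
          have := (mem_runKeys r b a).mpr (by simpa using hm)
          simpa using this
        have hnd : ¬ (a :: runKeys a (b :: r)).Nodup := by
          rw [hrk]; intro h; exact (List.nodup_cons.mp h).1 hmk
        simp only [altLoop, ne_eq]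
        rw [if_pos ⟨fun h => hb h.symm, by simpa [List.contains_eq_mem] using hm⟩, if_neg hnd]
      · have hmk : a ∉ b :: runKeys b r := fun h => hm ((mem_runKeys r b a).mp h)
        have : (a :: runKeys a (b :: r)).Nodup ↔ (b :: runKeys b r).Nodup := by
          rw [hrk, List.nodup_cons]; tauto
        simp only [altLoop, ne_eq]
        rw [if_neg (by simpa [List.contains_eq_mem] using fun _ => hm), ih b]
        by_cases hnd : (b :: runKeys b r).Nodup
        · rw [if_pos hnd, if_pos (this.mpr hnd)]
        · rw [if_neg hnd, if_neg (fun h => hnd (this.mp h))]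

-- ===== VERDICT (by name: the statement is the Claim_ definition above) =====
theorem check_spec : Claim_equal_check := by
  intro word _ hpre
  unfold Spec_check
  have hne : word.toList ≠ [] := by simpa using hpre
  obtain ⟨t, rest, hw⟩ : ∃ t rest, word.toList = t :: rest := by
    cases hlist : word.toList with
    | nil => exact absurd hlist hne
    | cons a l => exact ⟨a, l, rfl⟩
  have hget : PySem.Str.pyGet? word 0 = some t := by simp [hw]
  unfold check check_alt
  rw [hget, hw]
  show checkLoop (t :: rest) t [t] = altLoop (t :: rest)
  rw [checkLoop_eq (t :: rest) t [t] (List.nodup_singleton t), altLoop_eq rest t]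
  simp [runKeys]
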